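-- pv_equiv track=rewrite | github.com/zengtianli/scripts | scripts/document/docx_style_cleanup.py | get_basedOn_ids
-- ===== SOURCE A (Python) =====
-- def get_basedOn_ids(style_map: dict, used_ids: set) -> set:
--     """递归找出所有被使用样式依赖的 basedOn 样式"""
--     needed = set(used_ids)
--     queue = list(used_ids)
--     while queue:
--         sid = queue.pop()
--         info = style_map.get(sid)
--         if info and info["basedOn"] and info["basedOn"] not in needed:
--             needed.add(info["basedOn"])
--             queue.append(info["basedOn"])
--     return needed
-- ===== SOURCE B (Python) =====
-- def get_basedOn_ids(style_map: dict, used_ids: set) -> set: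
--     """递归找出所有被使用样式依赖的 basedOn 样式"""
--     needed = set(used_ids)
--     for sid in used_ids:
--         cur = sid
--         info = style_map.get(cur)
--         while info:
--             nxt = info["basedOn"]
--             if not nxt or nxt in needed:
--                 break
--             needed.add(nxt)
--             cur = nxt
--             info = style_map.get(cur)
--     return needed
-- ===== Notes on version B (the rewrite author's own statement) =====
-- stated objective: alternative
-- what changed: Replaces A's single LIFO worklist (queue of pending ids, popped and possibly re-extended) by a per-used-id outer loop with an inner while loop that walks each id's basedOn chain directly, with the same falsy/seen guards.
-- outside the precondition, e.g. on get_basedOn_ids({'x': {'k': None}, 'a': {'basedOn': 'x'}}, set()): A returns set(), B returns set()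
import Mathlib
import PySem

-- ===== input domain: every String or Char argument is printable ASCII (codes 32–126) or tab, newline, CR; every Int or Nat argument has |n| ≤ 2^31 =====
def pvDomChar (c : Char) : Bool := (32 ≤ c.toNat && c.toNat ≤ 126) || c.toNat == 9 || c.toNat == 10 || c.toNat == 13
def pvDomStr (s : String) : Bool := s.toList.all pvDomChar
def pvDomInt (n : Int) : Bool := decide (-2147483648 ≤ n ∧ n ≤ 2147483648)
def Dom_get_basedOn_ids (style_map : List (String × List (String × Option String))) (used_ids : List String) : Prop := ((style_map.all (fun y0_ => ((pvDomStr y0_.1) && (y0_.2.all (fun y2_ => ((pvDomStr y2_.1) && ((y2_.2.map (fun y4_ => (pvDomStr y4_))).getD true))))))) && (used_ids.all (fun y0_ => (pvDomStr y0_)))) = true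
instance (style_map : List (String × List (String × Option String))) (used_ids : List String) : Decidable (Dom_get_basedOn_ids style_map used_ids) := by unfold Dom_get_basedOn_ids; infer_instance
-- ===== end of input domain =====

-- B replaces A's single LIFO worklist by an outer loop over the used ids with an inner walk
-- along each id's basedOn chain (objective: alternative decomposition, same cost).
-- Both ports consume the 'used_ids' set only in ways whose RESULT does not depend on Python's
-- hash order (the returned set is the unique basedOn-closure; outputs are compared as sets);
-- 'queue = list(used_ids)' is materialised in reverse insertion order, so popping from the
-- end visits the ids in insertion order.

-- ===== PORT A =====
-- style_map.get(sid) guarded by 'if info and info["basedOn"] and …', collapsed to the Option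
-- of the truthy basedOn pointer: none = sid missing, empty style dict (falsy), basedOn None or ""
-- (falsy).  A nonempty style dict WITHOUT the key "basedOn" raises KeyError in Python; such
-- inputs are excluded by Pre_, the port returns none there.
def pvStyleStep (style_map : List (String × List (String × Option String))) (sid : String) : Option String :=
  match PySem.Dict.get? (PySem.Dict.mk style_map) sid with
  | none => none
  | some info =>
    match PySem.Dict.get? (PySem.Dict.mk info) "basedOn" with
    | some (some s) => if s == "" then none else some s
    | _ => none

-- finite universe every id ever held in 'needed' belongs to (used ids and all inner-dict values)
def pvUniverse (style_map : List (String × List (String × Option String))) (used_ids : List String) : List String :=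
  PySem.List.dedup (used_ids ++ style_map.flatMap (fun p => p.2.filterMap (fun q => q.2)))

-- first-match dict lookup only yields values stored in the association list
theorem pvDict_get_mem {κ ν : Type} [BEq κ] {l : List (κ × ν)} {k : κ} {v : ν} (h : PySem.Dict.get? (PySem.Dict.mk l) k = some v) : ∃ k', (k', v) ∈ l := by
  simp only [PySem.Dict.get?, Option.map_eq_some_iff] at h
  obtain ⟨p, hfind, rfl⟩ := h
  exact ⟨p.1, List.mem_of_find?_eq_some hfind⟩

-- any truthy basedOn pointer the step function can yield lies in the universe
theorem pvStyleStep_mem_universe {style_map : List (String × List (String × Option String))} {used_ids : List String} {sid b : String} (h : pvStyleStep style_map sid = some b) : b ∈ pvUniverse style_map used_ids := by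
  unfold pvStyleStep at h
  cases h1 : PySem.Dict.get? (PySem.Dict.mk style_map) sid with
  | none => simp [h1] at h
  | some info =>
    simp only [h1] at h
    cases h2 : PySem.Dict.get? (PySem.Dict.mk info) "basedOn" with
    | none => simp [h2] at h
    | some ob =>
      simp only [h2] at h
      cases ob with
      | none => simp at h
      | some s =>
        simp at h
        obtain ⟨hne, rfl⟩ := h
        obtain ⟨k1, hm1⟩ := pvDict_get_mem h1
        obtain ⟨k2, hm2⟩ := pvDict_get_mem h2
        simp [pvUniverse]
        right
        exact ⟨k1, info, hm1, k2, hm2⟩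

-- facts the ports' termination measures need (cited in decreasing_by)
theorem pvContains_false_not_mem {s : List String} {b : String} (h : ¬ (PySem.Set.contains s b = true)) : b ∉ s := by
  simp [PySem.Set.contains] at h; exact h

theorem pvAdd_nodup {s : List String} {b : String} (hn : s.Nodup) (h : ¬ (PySem.Set.contains s b = true)) : (PySem.Set.add s b).Nodup := by
  have hb := pvContains_false_not_mem h
  simp [PySem.Set.add, PySem.Set.contains, hb, hn, List.nodup_append]
  exact fun a ha hab => hb (hab ▸ ha)

theorem pvAdd_subset {s U : List String} {b : String} (hs : s ⊆ U) (hb : b ∈ U) : PySem.Set.add s b ⊆ U := by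
  unfold PySem.Set.add
  split
  · exact hs
  · exact List.append_subset.mpr ⟨hs, by simpa using hb⟩

theorem pvAdd_length {s : List String} {b : String} (h : ¬ (PySem.Set.contains s b = true)) : (PySem.Set.add s b).length = s.length + 1 := by
  have hb := pvContains_false_not_mem h
  simp [PySem.Set.add, PySem.Set.contains, hb]

theorem pvAdd_length_le {s U : List String} {b : String} (hn : s.Nodup) (hs : s ⊆ U) (hb : b ∈ U) (h : ¬ (PySem.Set.contains s b = true)) : s.length + 1 ≤ U.length := by
  have h1 := ((pvAdd_nodup hn h).subperm (pvAdd_subset hs hb)).length_le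
  have h2 := pvAdd_length h
  omega

-- A's worklist loop: 'while queue: sid = queue.pop(); …'.  'needed' carries its set
-- invariants (no duplicates, inside the finite universe U) so the loop terminates.
def pvLoopA (step : String → Option String) (U : List String)
    (needed : {l : List String // l.Nodup ∧ l ⊆ U}) (queue : List String)
    (hU : ∀ s b, step s = some b → b ∈ U) : List String :=
  if hq : queue = [] then needed.val
  else
    let sid := queue.getLast hq
    let rest := queue.dropLast
    match hstep : step sid with
    | none => pvLoopA step U needed rest hU
    | some b =>
      if hb : PySem.Set.contains needed.val b then pvLoopA step U needed rest hU
      else pvLoopA step U ⟨PySem.Set.add needed.val b, pvAdd_nodup needed.2.1 hb, pvAdd_subset needed.2.2 (hU sid b hstep)⟩ (rest ++ [b]) hU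
termination_by queue.length + 2 * (U.length - needed.val.length)
decreasing_by
  · have h1 : queue.length ≠ 0 := by simp [hq]
    simp only [List.length_dropLast]; omega
  · have h1 : queue.length ≠ 0 := by simp [hq]
    simp only [List.length_dropLast]; omega
  · have h1 : queue.length ≠ 0 := by simp [hq]
    have h2 := pvAdd_length hb
    have h3 := pvAdd_length_le needed.2.1 needed.2.2 (hU sid b hstep) hb
    simp [List.length_dropLast, h2]
    omega

def get_basedOn_ids (style_map : List (String × List (String × Option String))) (used_ids : List String) : List String :=
  -- needed = set(used_ids); queue = list(used_ids); while queue: … ; return needed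
  pvLoopA (pvStyleStep style_map) (pvUniverse style_map used_ids)
    ⟨PySem.Set.ofList used_ids, PySem.Set.nodup_ofList used_ids, by
      intro x hx
      simp [pvUniverse]
      exact Or.inl ((PySem.Set.mem_ofList used_ids x).mp hx)⟩
    ((PySem.Set.ofList used_ids).reverse)
    (fun s b h => pvStyleStep_mem_universe h)

-- ===== PORT B =====
-- inner 'while info: nxt = info["basedOn"]; if not nxt or nxt in needed: break; …' chain walk
def pvWalkB (step : String → Option String) (U : List String)
    (needed : {l : List String // l.Nodup ∧ l ⊆ U}) (cur : String)
    (hU : ∀ s b, step s = some b → b ∈ U) : {l : List String // l.Nodup ∧ l ⊆ U} :=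
  match hstep : step cur with
  | none => needed
  | some b =>
    if hb : PySem.Set.contains needed.val b then needed
    else pvWalkB step U ⟨PySem.Set.add needed.val b, pvAdd_nodup needed.2.1 hb, pvAdd_subset needed.2.2 (hU cur b hstep)⟩ b hU
termination_by U.length - needed.val.length
decreasing_by
  have h2 := pvAdd_length hb
  have h3 := pvAdd_length_le needed.2.1 needed.2.2 (hU cur b hstep) hb
  simp [h2]; omega

-- outer 'for sid in used_ids:' loop
def pvOuterB (step : String → Option String) (U : List String)
    (needed : {l : List String // l.Nodup ∧ l ⊆ U}) (ids : List String)
    (hU : ∀ s b, step s = some b → b ∈ U) : {l : List String // l.Nodup ∧ l ⊆ U} :=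
  match ids with
  | [] => needed
  | id :: rest => pvOuterB step U (pvWalkB step U needed id hU) rest hU

def get_basedOn_ids_alt (style_map : List (String × List (String × Option String))) (used_ids : List String) : List String :=
  -- needed = set(used_ids); for sid in used_ids: walk the basedOn chain; return needed
  (pvOuterB (pvStyleStep style_map) (pvUniverse style_map used_ids)
    ⟨PySem.Set.ofList used_ids, PySem.Set.nodup_ofList used_ids, by
      intro x hx
      simp [pvUniverse]
      exact Or.inl ((PySem.Set.mem_ofList used_ids x).mp hx)⟩
    (PySem.Set.ofList used_ids)
    (fun s b h => pvStyleStep_mem_universe h)).val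

-- ===== PRECONDITION & SPEC =====
-- A raises KeyError iff it looks up a style id whose entry is a NONEMPTY dict lacking the key
-- "basedOn".  Every id A looks up is either a used id or a truthy basedOn value of some entry,
-- so Pre_ requires the key in every nonempty entry whose own key is a used id or a truthy
-- basedOn value of the map.  This is slightly conservative: it also excludes some inputs whose
-- offending entry is never actually reached and on which A still returns (see claim cites).
def Pre_get_basedOn_ids (style_map : List (String × List (String × Option String))) (used_ids : List String) : Prop :=
  (style_map.all (fun p =>
    !(used_ids.contains p.1 ||
      style_map.any (fun r => r.2.any (fun q => q.1 == "basedOn" && q.2 == some p.1 && p.1 != ""))) ||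
    (p.2.isEmpty || p.2.any (fun q => q.1 == "basedOn")))) = true
instance (style_map : List (String × List (String × Option String))) (used_ids : List String) : Decidable (Pre_get_basedOn_ids style_map used_ids) := by unfold Pre_get_basedOn_ids; infer_instance

def pvWitness_get_basedOn_ids : (List (String × List (String × Option String))) × List String :=
  ([("a", [("basedOn", some "b")]), ("b", [("basedOn", none)])], ["a"])

def Spec_get_basedOn_ids (style_map : List (String × List (String × Option String))) (used_ids : List String) (out : List String) : Prop := out = get_basedOn_ids_alt style_map used_ids
instance (style_map : List (String × List (String × Option String))) (used_ids : List String) (out : List String) : Decidable (Spec_get_basedOn_ids style_map used_ids out) := by unfold Spec_get_basedOn_ids; infer_instance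

-- ===== CLAIM (what is proved, stated in full; the proofs are below) =====
def Claim_equal_get_basedOn_ids : Prop := ∀ (style_map : List (String × List (String × Option String))) (used_ids : List String), Dom_get_basedOn_ids style_map used_ids → Pre_get_basedOn_ids style_map used_ids → Spec_get_basedOn_ids style_map used_ids (get_basedOn_ids style_map used_ids)

-- ===== LEMMAS AND PROOFS =====

-- ===== VERDICT (by name: the statement is the Claim_ definition above) =====

theorem pvLoopA_concat (step : String → Option String) (U : List String)
    (hU : ∀ s b, step s = some b → b ∈ U) :
    ∀ (k : Nat) (needed : {l : List String // l.Nodup ∧ l ⊆ U}) (q : List String) (id : String),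
      U.length - needed.val.length ≤ k →
      pvLoopA step U needed (q ++ [id]) hU = pvLoopA step U (pvWalkB step U needed id hU) q hU := by
  intro k
  induction k using Nat.strong_induction_on with
  | _ k IH =>
    intro needed q id hk
    rw [pvLoopA.eq_def, pvWalkB.eq_def]
    simp only [List.dropLast_concat, List.append_eq_nil_iff]
    rw [dif_neg (by simp)]
    have hlast : (q ++ [id]).getLast (by simp) = id := List.getLast_concat
    split
    · -- step id = none: both sides are one plain recursive step
      rename_i hstep
      rw [hlast] at hstep
      split
      · rfl
      · rename_i b hstep'
        rw [hstep] at hstep'; exact absurd hstep' (by simp)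
    · -- step id = some b
      rename_i b hstep
      rw [hlast] at hstep
      by_cases hb : PySem.Set.contains needed.val b = true
      · rw [dif_pos hb]
        split
        · rename_i hstep'; rw [hstep] at hstep'
        · rename_i b' hstep'
          rw [hstep] at hstep'
          obtain rfl : b = b' := by injection hstep' with h
          rw [dif_pos hb]
      · rw [dif_neg hb]
        split
        · rename_i hstep'; rw [hstep] at hstep'; exact absurd hstep' (by simp)
        · rename_i b' hstep'
          rw [hstep] at hstep'
          obtain rfl : b = b' := by injection hstep' with h
          rw [dif_neg hb]
          have h3 := pvAdd_length_le needed.2.1 needed.2.2 (hU id b hstep) hb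
          have h4 := pvAdd_length hb
          exact IH (k - 1) (by omega)
            ⟨PySem.Set.add needed.val b, pvAdd_nodup needed.2.1 hb, pvAdd_subset needed.2.2 (hU id b hstep)⟩
            q b (by simp [h4]; omega)

theorem pvLoopA_reverse (step : String → Option String) (U : List String)
    (hU : ∀ s b, step s = some b → b ∈ U) :
    ∀ (ids : List String) (needed : {l : List String // l.Nodup ∧ l ⊆ U}),
      pvLoopA step U needed ids.reverse hU = (pvOuterB step U needed ids hU).val := by
  intro ids
  induction ids with
  | nil => intro needed; rw [pvLoopA.eq_def]; simp [pvOuterB]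
  | cons id rest IH =>
    intro needed
    have hrev : (id :: rest).reverse = rest.reverse ++ [id] := by simp
    rw [hrev, pvLoopA_concat step U hU (U.length - needed.val.length) needed rest.reverse id le_rfl]
    rw [IH (pvWalkB step U needed id hU)]
    rfl

theorem get_basedOn_ids_spec : Claim_equal_get_basedOn_ids := by
  intro style_map used_ids _ _
  unfold Spec_get_basedOn_ids get_basedOn_ids get_basedOn_ids_alt
  exact pvLoopA_reverse _ _ _ (PySem.Set.ofList used_ids) _
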